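-- pv_equiv track=rewrite | github.com/RamananVr/Leetcodepython | backtracking/1307_Verbal_Arithmetic_Puzzle.py | is_solvable
-- ===== SOURCE A (Python) =====
-- from itertools import permutations
--
-- def is_solvable(words, result):
--     """
--     Determines if the given verbal arithmetic puzzle is solvable.
--
--     :param words: List[str] - List of words on the left side of the equation.
--     :param result: str - The result word on the right side of the equation.
--     :return: bool - True if the equation is solvable, False otherwise.
--     """
--     # Combine all unique characters from words and result
--     unique_chars = set("".join(words) + result)
--
--     # If there are more than 10 unique characters, it's impossible to assign digits
--     if len(unique_chars) > 10:
--         return False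
--
--     # Convert the unique characters into a list for easier indexing
--     unique_chars = list(unique_chars)
--
--     # Helper function to convert a word into its numeric value based on the mapping
--     def word_to_number(word, char_to_digit):
--         num = 0
--         for char in word:
--             num = num * 10 + char_to_digit[char]
--         return num
--
--     # Try all permutations of digits for the unique characters
--     for perm in permutations(range(10), len(unique_chars)):
--         char_to_digit = {char: digit for char, digit in zip(unique_chars, perm)}
--
--         # Check for leading zeros
--         if any(char_to_digit[word[0]] == 0 for word in words + [result]):
--             continue
--
--         # Calculate the sum of the left side and the value of the result
--         left_sum = sum(word_to_number(word, char_to_digit) for word in words)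
--         right_value = word_to_number(result, char_to_digit)
--
--         # Check if the equation is valid
--         if left_sum == right_value:
--             return True
--
--     return False
-- ===== SOURCE B (Python) =====
-- def is_solvable(words, result):
--     letters = list(dict.fromkeys("".join(words) + result))
--     if len(letters) > 10:
--         return False
--
--     # coefficient of each letter in (sum of words) - result
--     coef = {}
--
--     def add_word(w, sign):
--         p = 1
--         for ch in reversed(w):
--             coef[ch] = coef.get(ch, 0) + sign * p
--             p *= 10
--
--     for w in words:
--         add_word(w, 1)
--     add_word(result, -1)
--
--     leading = set(w[0] for w in words)
--     leading.add(result[0])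
--
--     def dfs(rem, avail, total):
--         if not rem:
--             return total == 0
--         ch = rem[0]
--         for d in avail:
--             if d == 0 and ch in leading:
--                 continue
--             if dfs(rem[1:], [x for x in avail if x != d], total + coef[ch] * d):
--                 return True
--         return False
--
--     return dfs(letters, list(range(10)), 0)
-- ===== Notes on version B (the rewrite author's own statement) =====
-- stated objective: faster
-- what changed: B precomputes one signed place-value coefficient per letter (sum(words)-result is a linear form) and runs DFS backtracking over letters with leading-zero pruning and an O(1) incremental total, instead of A's enumeration of all digit permutations that rebuilds the char->digit dict and re-evaluates every word per permutation.
import Mathlib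
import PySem

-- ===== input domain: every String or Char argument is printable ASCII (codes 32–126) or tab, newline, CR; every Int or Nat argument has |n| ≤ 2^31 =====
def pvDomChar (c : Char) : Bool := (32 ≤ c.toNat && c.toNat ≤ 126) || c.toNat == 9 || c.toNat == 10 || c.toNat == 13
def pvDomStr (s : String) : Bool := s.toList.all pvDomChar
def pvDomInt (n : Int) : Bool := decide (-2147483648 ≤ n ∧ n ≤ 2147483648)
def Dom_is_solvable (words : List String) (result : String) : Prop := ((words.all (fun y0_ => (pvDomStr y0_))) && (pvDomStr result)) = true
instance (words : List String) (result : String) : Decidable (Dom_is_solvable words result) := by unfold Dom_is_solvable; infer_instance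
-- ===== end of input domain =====

-- B replaces A's digit-permutation enumeration (which rebuilds the char->digit dict and re-evaluates
-- every word per permutation) by per-letter signed place-value coefficients plus DFS backtracking
-- with leading-zero pruning and an incrementally maintained total (objective: faster).

-- ===== PORT A =====
-- the characters of '"".join(words) + result' (both programs form this same string)
def pvAllChars (words : List String) (result : String) : List Char :=
  (PySem.Str.join "" words).toList ++ result.toList

-- helper word_to_number: char_to_digit[char] never misses a key (the dict maps every character
-- of words and result), so getD 0 is exact there
def wordToNumber (word : String) (ctd : PySem.Dict Char Int) : Int :=
  word.toList.foldl (fun num ch => num * 10 + ctd.getD ch 0) 0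

def is_solvable (words : List String) (result : String) : Bool :=
  let uniqueChars : PySem.Set Char := PySem.Set.ofList (pvAllChars words result)
  if uniqueChars.length > 10 then false
  else
    (PySem.List.permutations (PySem.List.pyRange 0 10 1) uniqueChars.length).any fun perm =>
      let ctd : PySem.Dict Char Int := PySem.Dict.ofList (uniqueChars.zip perm)
      -- word[0] raises IndexError on an empty word/result: excluded by Pre_, headD is a placeholder
      if (words ++ [result]).any (fun w => ctd.getD (w.toList.headD ' ') 0 == 0) then false
      else ((words.map (fun w => wordToNumber w ctd)).sum == wordToNumber result ctd)

-- ===== PORT B =====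
-- add_word: fold of 'coef[ch] = coef.get(ch, 0) + sign * p; p *= 10' over reversed(w)
def addWord (coef : PySem.Dict Char Int) (w : String) (sign : Int) : PySem.Dict Char Int :=
  (w.toList.reverse.foldl
    (fun (st : PySem.Dict Char Int × Int) ch =>
      (st.1.insert ch (st.1.getD ch 0 + sign * st.2), st.2 * 10))
    (coef, 1)).1

def dfsB (coef : PySem.Dict Char Int) (leading : PySem.Set Char) :
    List Char → List Int → Int → Bool
  | [], _, total => total == 0
  | ch :: rem, avail, total =>
      avail.any fun d =>
        if d == 0 && leading.contains ch then false
        else dfsB coef leading rem (avail.filter (fun x => x != d)) (total + coef.getD ch 0 * d)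

def is_solvable_alt (words : List String) (result : String) : Bool :=
  let letters : List Char := PySem.List.dedup (pvAllChars words result)  -- dict.fromkeys
  if letters.length > 10 then false
  else
    let coef : PySem.Dict Char Int :=
      addWord (words.foldl (fun c w => addWord c w 1) PySem.Dict.empty) result (-1)
    -- w[0]/result[0] raise IndexError on an empty word/result: excluded by Pre_
    let leading : PySem.Set Char :=
      PySem.Set.add (PySem.Set.ofList (words.map (fun w => w.toList.headD ' ')))
        (result.toList.headD ' ')
    dfsB coef leading letters (PySem.List.pyRange 0 10 1) 0

-- ===== PRECONDITION & SPEC =====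
-- Pre_ excludes exactly the inputs on which A raises IndexError (word[0] / result[0] of an empty
-- string, reached whenever at most 10 distinct characters occur); it excludes nothing A returns on.
def Pre_is_solvable (words : List String) (result : String) : Prop :=
  (PySem.Set.ofList (pvAllChars words result)).length ≤ 10 →
    ("" ∉ words ∧ result ≠ "")
instance (words : List String) (result : String) : Decidable (Pre_is_solvable words result) := by
  unfold Pre_is_solvable; infer_instance

def pvWitness_is_solvable : List String × String := (["A"], "B")

def Spec_is_solvable (words : List String) (result : String) (out : Bool) : Prop := out = is_solvable_alt words result
instance (words : List String) (result : String) (out : Bool) : Decidable (Spec_is_solvable words result out) := by unfold Spec_is_solvable; infer_instance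

-- ===== CLAIM (what is proved, stated in full; the proofs are below) =====
def Claim_equal_is_solvable : Prop := ∀ (words : List String) (result : String), Dom_is_solvable words result → Pre_is_solvable words result → Spec_is_solvable words result (is_solvable words result)

-- ===== LEMMAS AND PROOFS =====

-- abbreviations for the shared pieces of the two ports (definitionally what the ports compute)
def csOf (words : List String) (result : String) : List Char :=
  PySem.Set.ofList (pvAllChars words result)
def coefOf (words : List String) (result : String) : PySem.Dict Char Int :=
  addWord (words.foldl (fun c w => addWord c w 1) PySem.Dict.empty) result (-1)
def leadingOf (words : List String) (result : String) : PySem.Set Char :=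
  PySem.Set.add (PySem.Set.ofList (words.map (fun w => w.toList.headD ' ')))
    (result.toList.headD ' ')

-- unfolding equation for PySem.List.permutations at a successor
theorem perms_succ {α : Type} (l : List α) (r : Nat) :
    PySem.List.permutations l (r+1) =
    (List.range l.length).flatMap (fun i =>
      match l[i]? with
      | none => []
      | some a => (PySem.List.permutations (l.eraseIdx i) r).map (fun p => a :: p)) := by
  rw [PySem.List.permutations]; rfl

-- membership in the k-permutations of a duplicate-free list
theorem mem_perms {α : Type} [DecidableEq α] (k : Nat) {l : List α} (hl : l.Nodup) (p : List α) :
    p ∈ PySem.List.permutations l k ↔ p.length = k ∧ p.Nodup ∧ ∀ x ∈ p, x ∈ l := by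
  induction k generalizing l p with
  | zero =>
    constructor
    · rintro h
      simp [PySem.List.permutations] at h
      subst h; simp
    · rintro ⟨hlen, -, -⟩
      rw [List.length_eq_zero_iff] at hlen; subst hlen
      simp [PySem.List.permutations]
  | succ r ih =>
    rw [perms_succ]
    simp only [List.mem_flatMap, List.mem_range]
    constructor
    · rintro ⟨i, hi, hp⟩
      have hget : l[i]? = some l[i] := List.getElem?_eq_getElem hi
      rw [hget] at hp
      simp only [List.mem_map] at hp
      obtain ⟨q, hq, rfl⟩ := hp
      have her : l.eraseIdx i = l.erase l[i] := (List.Nodup.erase_getElem hl i hi).symm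
      have hnd : (l.eraseIdx i).Nodup := hl.eraseIdx i
      obtain ⟨hlen, hqnd, hsub⟩ := (ih hnd q).mp hq
      refine ⟨by simp [hlen], ?_, ?_⟩
      · refine List.nodup_cons.mpr ⟨?_, hqnd⟩
        intro hmem
        have := hsub _ hmem
        rw [her] at this
        exact (List.Nodup.not_mem_erase hl) this
      · intro x hx
        rcases List.mem_cons.mp hx with rfl | hx
        · exact List.getElem_mem hi
        · exact List.mem_of_mem_eraseIdx (hsub _ hx)
    · rintro ⟨hlen, hnd, hsub⟩
      cases p with
      | nil => simp at hlen
      | cons a q =>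
        have ha : a ∈ l := hsub a (by simp)
        have hi : l.idxOf a < l.length := List.idxOf_lt_length_of_mem ha
        refine ⟨l.idxOf a, hi, ?_⟩
        have hget : l[l.idxOf a]? = some a := by
          rw [List.getElem?_eq_getElem hi, List.getElem_idxOf]
        rw [hget]
        simp only [List.mem_map]
        refine ⟨q, ?_, rfl⟩
        have her : l.eraseIdx (l.idxOf a) = l.erase a := List.eraseIdx_idxOf_eq_erase a l
        apply (ih (hl.eraseIdx _) q).mpr
        obtain ⟨hna, hqnd⟩ := List.nodup_cons.mp hnd
        refine ⟨by simpa using hlen, hqnd, ?_⟩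
        intro x hx
        rw [her, List.mem_erase_of_ne (by rintro rfl; exact hna hx)]
        exact hsub x (by simp [hx])

-- the DFS explores exactly the injective digit choices
theorem dfs_iff (coef : PySem.Dict Char Int) (leading : PySem.Set Char)
    (cs : List Char) (avail : List Int) (total : Int) :
    dfsB coef leading cs avail total = true ↔
      ∃ p : List Int, p.length = cs.length ∧ p.Nodup ∧ (∀ x ∈ p, x ∈ avail) ∧
        ((cs.zip p).all (fun cd => !(cd.2 == 0 && leading.contains cd.1))) = true ∧
        total + ((cs.zip p).map (fun cd => coef.getD cd.1 0 * cd.2)).sum = 0 := by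
  induction cs generalizing avail total with
  | nil =>
    simp only [dfsB, beq_iff_eq]
    constructor
    · intro h; exact ⟨[], by simp, by simp, by simp, by simp, by simpa using h⟩
    · rintro ⟨p, hlen, -, -, -, hsum⟩
      rw [List.length_eq_zero_iff.mp hlen] at hsum
      simpa using hsum
  | cons ch rem ih =>
    simp only [dfsB, List.any_eq_true]
    constructor
    · rintro ⟨d, hd, hb⟩
      split at hb
      · simp at hb
      · rename_i hbad
        obtain ⟨q, hlen, hnd, hsub, hall, hsum⟩ := (ih _ _).mp hb
        refine ⟨d :: q, by simp [hlen], ?_, ?_, ?_, ?_⟩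
        · refine List.nodup_cons.mpr ⟨fun hdq => ?_, hnd⟩
          have := hsub d hdq
          simp [List.mem_filter] at this
        · intro x hx
          rcases List.mem_cons.mp hx with rfl | hx
          · exact hd
          · exact (List.mem_filter.mp (hsub x hx)).1
        · rw [List.zip_cons_cons, List.all_cons, Bool.and_eq_true]
          exact ⟨by revert hbad; cases (d == 0 && leading.contains ch) <;> simp, hall⟩
        · simp only [List.zip_cons_cons, List.map_cons, List.sum_cons]
          linarith [hsum]
    · rintro ⟨p, hlen, hnd, hsub, hall, hsum⟩
      cases p with
      | nil => simp at hlen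
      | cons d q =>
        refine ⟨d, hsub d (by simp), ?_⟩
        rw [List.zip_cons_cons, List.all_cons, Bool.and_eq_true] at hall
        obtain ⟨h1, h2⟩ := hall
        rw [if_neg (by revert h1; cases (d == 0 && leading.contains ch) <;> simp)]
        obtain ⟨hna, hqnd⟩ := List.nodup_cons.mp hnd
        apply (ih _ _).mpr
        refine ⟨q, by simpa using hlen, hqnd, ?_, h2, ?_⟩
        · intro x hx
          refine List.mem_filter.mpr ⟨hsub x (by simp [hx]), ?_⟩
          simp only [bne_iff_ne, ne_eq]
          rintro rfl; exact hna hx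
        · simp only [List.zip_cons_cons, List.map_cons, List.sum_cons] at hsum
          linarith [hsum]

-- lookup of a fresh key is unchanged through a fold of inserts of other keys
theorem get?_update_of_not_mem {ps : List (Char × Int)} {c : Char}
    (h : ∀ q ∈ ps, q.1 ≠ c) (d : PySem.Dict Char Int) :
    (d.update ps).get? c = d.get? c := by
  induction ps generalizing d with
  | nil => rfl
  | cons q ps ih =>
    show ((d.insert q.1 q.2).update ps).get? c = _
    rw [ih (fun r hr => h r (by simp [hr])) _,
        PySem.Dict.get?_insert_of_ne _ _ (Ne.symm (h q (by simp)))]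

-- lookup at a key that the pair list binds does not depend on the base dict
theorem get?_update_congr {ps : List (Char × Int)} {c : Char}
    (h : ∃ q ∈ ps, q.1 = c) (d d' : PySem.Dict Char Int) :
    (d.update ps).get? c = (d'.update ps).get? c := by
  induction ps generalizing d d' with
  | nil => obtain ⟨q, hq, -⟩ := h; simp at hq
  | cons q0 ps ih =>
    show ((d.insert q0.1 q0.2).update ps).get? c = ((d'.insert q0.1 q0.2).update ps).get? c
    by_cases hrest : ∃ q ∈ ps, q.1 = c
    · exact ih hrest _ _
    · obtain ⟨q, hq, hqc⟩ := h
      rcases List.mem_cons.mp hq with rfl | hq'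
      · rw [get?_update_of_not_mem (fun r hr => fun hrc => hrest ⟨r, hr, hrc⟩) _,
            get?_update_of_not_mem (fun r hr => fun hrc => hrest ⟨r, hr, hrc⟩) _,
            hqc, PySem.Dict.get?_insert_self, PySem.Dict.get?_insert_self]
      · exact absurd ⟨q, hq', hqc⟩ hrest

-- lookup in the zip dict: pairs of the zip read back their own digit
theorem getD_ofList_zip {cs : List Char} {p : List Int} (hcs : cs.Nodup)
    {c : Char} {d : Int} (hmem : (c, d) ∈ cs.zip p) :
    (PySem.Dict.ofList (cs.zip p)).getD c 0 = d := by
  induction cs generalizing p with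
  | nil => simp at hmem
  | cons a cs ih =>
    cases p with
    | nil => simp at hmem
    | cons v p =>
      rw [List.zip_cons_cons] at hmem ⊢
      obtain ⟨ha, hnd⟩ := List.nodup_cons.mp hcs
      rcases List.mem_cons.mp hmem with h | h
      · obtain ⟨rfl, rfl⟩ := Prod.mk.injEq .. ▸ h
        show ((PySem.Dict.empty.insert c d).update (cs.zip p)).getD c 0 = d
        unfold PySem.Dict.getD
        rw [get?_update_of_not_mem (fun q hq => ?_) _, PySem.Dict.get?_insert_self]
        · rfl
        · rintro rfl
          exact ha (List.of_mem_zip hq).1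
      · -- key c sits in the tail zip; the head insert uses a different key
        have hc : c ∈ cs := (List.of_mem_zip h).1
        show ((PySem.Dict.empty.insert a v).update (cs.zip p)).getD c 0 = d
        have := ih hnd h
        unfold PySem.Dict.getD at this ⊢
        rw [get?_update_congr ⟨(c, d), h, rfl⟩ _ PySem.Dict.empty]
        exact this

-- getD after insert
theorem getD_insert' (d : PySem.Dict Char Int) (ch c : Char) (v : Int) :
    (d.insert ch v).getD c 0 = if c = ch then v else d.getD c 0 := by
  unfold PySem.Dict.getD
  split
  · rename_i h; rw [h, PySem.Dict.get?_insert_self]; rfl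
  · rename_i h; rw [PySem.Dict.get?_insert_of_ne _ _ h]

-- updating one key shifts the evaluation sum at exactly that key
theorem sumEval_insert (cs : List Char) (hcs : cs.Nodup) (d : PySem.Dict Char Int)
    (m : Char → Int) {ch : Char} (hch : ch ∈ cs) (v : Int) :
    (cs.map (fun c => (d.insert ch v).getD c 0 * m c)).sum =
      (cs.map (fun c => d.getD c 0 * m c)).sum + (v - d.getD ch 0) * m ch := by
  induction cs with
  | nil => simp at hch
  | cons a cs ih =>
    obtain ⟨hna, hnd⟩ := List.nodup_cons.mp hcs
    simp only [List.map_cons, List.sum_cons]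
    rcases List.mem_cons.mp hch with h | hmem
    · rw [h, getD_insert']
      have : cs.map (fun c => (d.insert a v).getD c 0 * m c) = cs.map (fun c => d.getD c 0 * m c) := by
        apply List.map_congr_left
        intro c hc
        rw [getD_insert', if_neg (by rintro rfl; exact hna hc)]
      rw [this, if_pos rfl]; ring
    · rw [ih hnd hmem, getD_insert', if_neg (by rintro rfl; exact hna hmem)]; ring

-- little-endian digit polynomial of a reversed word
def hornerRev (m : PySem.Dict Char Int) : List Char → Int
  | [] => 0
  | c :: t => m.getD c 0 + 10 * hornerRev m t

theorem hornerRev_reverse (m : PySem.Dict Char Int) (l : List Char) :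
    hornerRev m l.reverse = l.foldl (fun num ch => num * 10 + m.getD ch 0) 0 := by
  induction l using List.reverseRecOn with
  | nil => rfl
  | append_singleton l c ih =>
    rw [List.reverse_append, List.foldl_append]
    simp only [List.reverse_cons, List.reverse_nil, List.nil_append, List.foldl_cons,
      List.foldl_nil, List.singleton_append, hornerRev]
    rw [ih]; ring

theorem sumEval_fold (cs : List Char) (hcs : cs.Nodup) (m : PySem.Dict Char Int) (sign : Int)
    (rcs : List Char) (hrcs : ∀ ch ∈ rcs, ch ∈ cs) (d : PySem.Dict Char Int) (p0 : Int) :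
    (cs.map (fun c =>
        ((rcs.foldl (fun (st : PySem.Dict Char Int × Int) ch =>
            (st.1.insert ch (st.1.getD ch 0 + sign * st.2), st.2 * 10)) (d, p0)).1).getD c 0
          * m.getD c 0)).sum =
      (cs.map (fun c => d.getD c 0 * m.getD c 0)).sum + sign * p0 * hornerRev m rcs := by
  induction rcs generalizing d p0 with
  | nil => simp [hornerRev]
  | cons ch t ih =>
    simp only [List.foldl_cons]
    rw [ih (fun x hx => hrcs x (by simp [hx])) _ _]
    rw [sumEval_insert cs hcs d (fun c => m.getD c 0) (hrcs ch (by simp)) _]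
    simp only [hornerRev]
    ring

-- addWord adds sign * (value of w) to the evaluation sum
theorem sumEval_addWord (cs : List Char) (hcs : cs.Nodup) (d : PySem.Dict Char Int)
    (m : PySem.Dict Char Int) (w : String) (sign : Int)
    (hw : ∀ ch ∈ w.toList, ch ∈ cs) :
    (cs.map (fun c => ((addWord d w sign).getD c 0) * m.getD c 0)).sum =
      (cs.map (fun c => (d.getD c 0) * m.getD c 0)).sum + sign * wordToNumber w m := by
  unfold addWord wordToNumber
  rw [sumEval_fold cs hcs m sign _ (fun ch hch => hw ch (by simpa using hch)) d 1,
      hornerRev_reverse]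
  ring

-- folding add_word over the word list accumulates the word values
theorem sumEval_words (cs : List Char) (hcs : cs.Nodup) (m : PySem.Dict Char Int) :
    ∀ (ws : List String), (∀ w ∈ ws, ∀ ch ∈ w.toList, ch ∈ cs) →
    ∀ (d : PySem.Dict Char Int),
    (cs.map (fun c => ((ws.foldl (fun c w => addWord c w 1) d).getD c 0) * m.getD c 0)).sum =
      (cs.map (fun c => (d.getD c 0) * m.getD c 0)).sum +
        (ws.map (fun w => wordToNumber w m)).sum := by
  intro ws
  induction ws with
  | nil => intro _ d; simp
  | cons w ws ih =>
    intro hws d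
    simp only [List.foldl_cons, List.map_cons, List.sum_cons]
    rw [ih (fun v hv => hws v (by simp [hv])) _,
        sumEval_addWord cs hcs d m w 1 (hws w (by simp))]
    ring

-- characters of any word (or of result) are among the distinct characters
theorem mem_join_of_mem (sep : List Char) (xss : List (List Char)) {w : List Char} (h : w ∈ xss)
    {c : Char} (hc : c ∈ w) : c ∈ PySem.Chars.join sep xss := by
  induction xss with
  | nil => simp at h
  | cons p rest ih =>
    cases rest with
    | nil => rw [List.mem_singleton.mp h] at hc; rwa [PySem.Chars.join_singleton]
    | cons q rest' =>
      rw [PySem.Chars.join_cons_cons]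
      rcases List.mem_cons.mp h with heq | h'
      · rw [heq] at hc; simp [hc]
      · simp [ih h']

theorem mem_csOf (words : List String) (result : String) {w : String}
    (hw : w ∈ words ++ [result]) {c : Char} (hc : c ∈ w.toList) :
    c ∈ csOf words result := by
  unfold csOf pvAllChars
  rw [PySem.Set.mem_ofList]
  rcases List.mem_append.mp hw with h | h
  · apply List.mem_append_left
    rw [PySem.Str.toList_join]
    exact mem_join_of_mem _ _ (List.mem_map_of_mem h) hc
  · rw [List.mem_singleton.mp h] at hc
    exact List.mem_append_right _ hc

-- any member of the char list is the first component of some zip pair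
theorem exists_zip_pair {cs : List Char} {p : List Int} {c : Char}
    (h : c ∈ cs) (hl : p.length = cs.length) : ∃ d, (c, d) ∈ cs.zip p := by
  have hi := List.idxOf_lt_length_of_mem h
  refine ⟨p[cs.idxOf c]'(by omega), ?_⟩
  have hz : (cs.zip p)[cs.idxOf c]'(by simp; omega) = (c, p[cs.idxOf c]'(by omega)) := by
    simp [List.getElem_zip, List.getElem_idxOf]
  exact hz ▸ List.getElem_mem _

-- nonempty strings: the ported word[0] is a character of the word
theorem headD_mem {l : List Char} (h : l ≠ []) (d : Char) : l.headD d ∈ l := by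
  cases l with
  | nil => exact absurd rfl h
  | cons a t => simp

-- the per-permutation checks of the two ports agree
theorem pointwise (words : List String) (result : String)
    (hne : "" ∉ words) (hr : result ≠ "")
    (p : List Int) (hlen : p.length = (csOf words result).length) :
    ((if (words ++ [result]).any
          (fun w => (PySem.Dict.ofList ((csOf words result).zip p)).getD (w.toList.headD ' ') 0 == 0)
        then false
        else ((words.map (fun w => wordToNumber w (PySem.Dict.ofList ((csOf words result).zip p)))).sum
          == wordToNumber result (PySem.Dict.ofList ((csOf words result).zip p)))) = true)
    ↔ (((((csOf words result).zip p).all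
          (fun cd => !(cd.2 == 0 && (leadingOf words result).contains cd.1))) = true)
        ∧ 0 + (((csOf words result).zip p).map
            (fun cd => (coefOf words result).getD cd.1 0 * cd.2)).sum = 0) := by
  have hcs : (csOf words result).Nodup := PySem.Set.nodup_ofList _
  set cs := csOf words result with hcsdef
  set m := PySem.Dict.ofList (cs.zip p) with hm
  have hpair : ∀ cd ∈ cs.zip p, m.getD cd.1 0 = cd.2 := fun cd hcd => getD_ofList_zip hcs hcd
  have hnonempty : ∀ w ∈ words ++ [result], w.toList ≠ [] := by
    intro w hw
    rw [ne_eq, String.toList_eq_nil_iff]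
    rcases List.mem_append.mp hw with h | h
    · rintro rfl; exact hne h
    · rw [List.mem_singleton.mp h]; exact hr
  -- leading-zero checks agree
  have hlead : ((words ++ [result]).any
      (fun w => m.getD (w.toList.headD ' ') 0 == 0)) = true ↔
      ¬ ((cs.zip p).all (fun cd => !(cd.2 == 0 && (leadingOf words result).contains cd.1))) = true := by
    rw [List.any_eq_true]
    constructor
    · rintro ⟨w, hw, h0⟩
      rw [beq_iff_eq] at h0
      intro hall
      rw [List.all_eq_true] at hall
      have hhead : w.toList.headD ' ' ∈ cs :=
        mem_csOf words result hw (headD_mem (hnonempty w hw) ' ')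
      obtain ⟨d, hd⟩ := exists_zip_pair hhead hlen
      have hdval : d = 0 := by
        have hp' : m.getD (w.toList.headD ' ') 0 = d := by simpa using hpair _ hd
        rw [← hp']; exact h0
      have hmemlead : w.toList.headD ' ' ∈ leadingOf words result := by
        unfold leadingOf
        rw [PySem.Set.mem_add]
        rcases List.mem_append.mp hw with h | h
        · exact Or.inl ((PySem.Set.mem_ofList _ _).mpr (List.mem_map_of_mem h))
        · rw [List.mem_singleton.mp h]; exact Or.inr rfl
      have hx : (!(d == 0 && (leadingOf words result).contains (w.toList.headD ' '))) = true :=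
        hall _ hd
      rw [hdval, (PySem.Set.contains_iff _ _).mpr hmemlead] at hx
      simp at hx
    · intro hnall
      rw [List.all_eq_true] at hnall
      push Not at hnall
      obtain ⟨cd, hcd, hbad⟩ := hnall
      have hbad' : cd.2 = 0 ∧ cd.1 ∈ leadingOf words result := by
        revert hbad
        by_cases h2 : cd.2 = 0 <;>
          by_cases h1 : cd.1 ∈ leadingOf words result <;>
            simp [h1, h2]
      obtain ⟨h2, h1⟩ := hbad'
      unfold leadingOf at h1
      rw [PySem.Set.mem_add, PySem.Set.mem_ofList] at h1
      have hget : m.getD cd.1 0 = 0 := by rw [hpair cd hcd, h2]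
      rcases h1 with h1 | h1
      · obtain ⟨w, hw, hwc⟩ := List.mem_map.mp h1
        exact ⟨w, List.mem_append_left _ hw, by rw [beq_iff_eq, hwc]; exact hget⟩
      · exact ⟨result, List.mem_append_right _ (by simp), by rw [beq_iff_eq, ← h1]; exact hget⟩
  -- sums agree
  have hcover : ∀ w ∈ words ++ [result], ∀ ch ∈ w.toList, ch ∈ cs :=
    fun w hw ch hch => mem_csOf words result hw hch
  have hsum : ((cs.zip p).map (fun cd => (coefOf words result).getD cd.1 0 * cd.2)).sum =
      (words.map (fun w => wordToNumber w m)).sum - wordToNumber result m := by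
    have e1 : (cs.zip p).map (fun cd => (coefOf words result).getD cd.1 0 * cd.2) =
        (cs.zip p).map (fun cd => (coefOf words result).getD cd.1 0 * m.getD cd.1 0) :=
      List.map_congr_left (fun cd hcd => by rw [hpair cd hcd])
    have e2 : (cs.zip p).map (fun cd => (coefOf words result).getD cd.1 0 * m.getD cd.1 0) =
        cs.map (fun c => (coefOf words result).getD c 0 * m.getD c 0) := by
      rw [show (fun cd : Char × Int => (coefOf words result).getD cd.1 0 * m.getD cd.1 0) =
            (fun c : Char => (coefOf words result).getD c 0 * m.getD c 0) ∘ Prod.fst from rfl,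
          ← List.map_map, List.map_fst_zip (by omega)]
    rw [e1, e2]
    unfold coefOf
    rw [sumEval_addWord cs hcs _ m result (-1)
        (hcover result (List.mem_append_right _ (by simp))),
        sumEval_words cs hcs m words
        (fun w hw => hcover w (List.mem_append_left _ hw)) _]
    have hempty : (cs.map (fun c => (PySem.Dict.empty.getD c 0 : Int) * m.getD c 0)).sum = 0 :=
      List.sum_eq_zero (by intro x hx; obtain ⟨c, -, rfl⟩ := List.mem_map.mp hx
                           rw [PySem.Dict.getD_empty]; ring)
    rw [hempty]; ring
  constructor
  · intro h
    split at h
    · simp at h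
    · rename_i hnolead
      have hprune : ((cs.zip p).all
          (fun cd => !(cd.2 == 0 && (leadingOf words result).contains cd.1))) = true := by
        by_contra hq
        exact hnolead (hlead.mpr hq)
      refine ⟨hprune, ?_⟩
      rw [beq_iff_eq] at h
      rw [hsum]; omega
  · rintro ⟨hprune, hzero⟩
    rw [if_neg (by intro hx; exact (hlead.mp hx) hprune), beq_iff_eq]
    rw [hsum] at hzero
    omega

-- ===== VERDICT (by name: the statement is the Claim_ definition above) =====
theorem is_solvable_spec : Claim_equal_is_solvable := by
  intro words result _ hpre
  show is_solvable words result = is_solvable_alt words result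
  simp only [is_solvable, is_solvable_alt, PySem.List.dedup_eq_ofList]
  split_ifs with hgt
  · rfl
  · have hcs : (csOf words result).Nodup := PySem.Set.nodup_ofList _
    have hdig : (PySem.List.pyRange 0 10 1).Nodup := PySem.List.nodup_pyRange_one 0 10
    obtain ⟨hne, hr⟩ := hpre (by omega)
    apply Bool.coe_iff_coe.mp
    rw [dfs_iff, List.any_eq_true]
    constructor
    · rintro ⟨p, hp, hcheck⟩
      obtain ⟨hlen, hnd, hsub⟩ := (mem_perms _ hdig p).mp hp
      obtain ⟨h1, h2⟩ := (pointwise words result hne hr p hlen).mp hcheck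
      exact ⟨p, hlen, hnd, hsub, h1, h2⟩
    · rintro ⟨p, hlen, hnd, hsub, hall, hzero⟩
      refine ⟨p, (mem_perms _ hdig p).mpr ⟨hlen, hnd, hsub⟩, ?_⟩
      exact (pointwise words result hne hr p hlen).mpr ⟨hall, hzero⟩
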